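-- pv_equiv track=rewrite | github.com/tibbe78/Yatzy | yatzy.py | count_two_pairs_score
-- ===== SOURCE A (Python) =====
-- from typing import List, Dict
--
-- def count_two_pairs_score(dices: List[int], notused):
--     dices.sort(reverse=True)
--     temp_score = 0
--     prev_dice = 0
--     for i, dice in enumerate(dices):
--         if i > len(dices)-2:
--             return 0
--         if dice == prev_dice:
--             continue
--         if dice == dices[i+1]:
--             if temp_score != 0:
--                 return temp_score + (dice * 2)
--             temp_score = dice * 2
--         prev_dice = dice
--     return 0
-- ===== SOURCE B (Python) =====
-- def count_two_pairs_score(dices, notused):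
--     dices.sort(reverse=True)  # kept for A's observable in-place sort side effect
--     counts = {}
--     for d in dices:
--         counts[d] = counts.get(d, 0) + 1
--     pair_values = sorted((v for v, c in counts.items() if c >= 2), reverse=True)
--     if len(pair_values) >= 2:
--         return (pair_values[0] + pair_values[1]) * 2
--     return 0
-- ===== Notes on version B (the rewrite author's own statement) =====
-- stated objective: simpler
-- what changed: Replaces A's stateful index-based scan over the sorted list (prev/temp sentinel variables, early returns, dices[i+1] lookahead) by a frequency table: count each value once, take the two largest distinct values with count >= 2 and return their doubled sum, keeping the in-place reverse sort only for its observable side effect.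
-- intended difference: On lists with at least two zeros, some repeated negative value and no repeated positive value, A's 0-valued sentinels (prev_dice=0, temp_score!=0) make it ignore the pair of zeros and return 0 or the sum of the two highest non-zero pairs, while B returns the intended doubled sum of the two highest pair values (e.g. [0,0,-1,-1] -> A 0, B -2); B treats 0 as an ordinary die value. — e.g. on count_two_pairs_score([0, 0, -1, -1], 0): A returns 0, B returns -2
import Mathlib
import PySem

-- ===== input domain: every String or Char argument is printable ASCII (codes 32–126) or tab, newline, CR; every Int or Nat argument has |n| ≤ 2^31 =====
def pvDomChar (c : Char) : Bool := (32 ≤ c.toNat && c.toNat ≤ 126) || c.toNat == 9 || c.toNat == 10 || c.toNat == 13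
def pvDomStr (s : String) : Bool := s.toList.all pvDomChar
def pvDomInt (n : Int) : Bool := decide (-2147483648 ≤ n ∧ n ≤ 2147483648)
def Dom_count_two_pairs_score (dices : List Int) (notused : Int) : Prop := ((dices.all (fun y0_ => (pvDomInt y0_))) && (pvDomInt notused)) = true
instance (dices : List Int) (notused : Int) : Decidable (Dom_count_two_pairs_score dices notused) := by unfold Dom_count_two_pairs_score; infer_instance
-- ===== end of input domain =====

-- B replaces A's sentinel-based scan of the sorted list by a frequency table (count once,
-- take the two largest distinct values occurring at least twice); both versions sort the
-- argument in place in Python — the theorems here are about the return value only.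


-- ===== PORT A =====
-- the for-loop of A: `rest` is the not-yet-visited suffix of enumerate(dices);
-- `dices[i+1]` is read with pyGet? — the loop's own guard `i > len(dices)-2`
-- keeps the index in range, so the `none` (IndexError) branch is unreachable
-- (it returns 0 there, a value Python never produces on this path).
def count_two_pairs_score_go (dices : List Int) (rest : List (Int × Int)) (temp_score prev_dice : Int) : Int :=
  match rest with
  | [] => 0
  | (i, dice) :: rs =>
    if i > (dices.length : Int) - 2 then 0
    else if dice = prev_dice then count_two_pairs_score_go dices rs temp_score prev_dice
    else if PySem.List.pyGet? dices (i + 1) = some dice then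
      (if temp_score ≠ 0 then temp_score + dice * 2
       else count_two_pairs_score_go dices rs (dice * 2) dice)
    else count_two_pairs_score_go dices rs temp_score dice

def count_two_pairs_score (dices : List Int) (notused : Int) : Int :=
  let s := PySem.List.sorted dices (fun x => x) true    -- dices.sort(reverse=True)
  count_two_pairs_score_go s (PySem.List.enumerate s) 0 0

-- ===== PORT B =====
def count_two_pairs_score_alt (dices : List Int) (notused : Int) : Int :=
  let s := PySem.List.sorted dices (fun x => x) true    -- dices.sort(reverse=True)
  let counts := s.foldl (fun d x => d.insert x (d.getD x 0 + 1)) (PySem.Dict.empty : PySem.Dict Int Int)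
  let pair_values := PySem.List.sorted ((counts.items.filter (fun kv => 2 ≤ kv.2)).map Prod.fst) (fun x => x) true
  match pair_values with
  | a :: b :: _ => (a + b) * 2
  | _ => 0

-- ===== PRECONDITION & SPEC =====
-- On lists with at least two zeros, some repeated negative value and no repeated positive
-- value, A's 0-valued sentinels (prev_dice = 0, temp_score != 0) make it ignore the pair of
-- zeros, returning 0 or the sum of the two highest non-zero pairs, while B returns the
-- intended doubled sum of the two highest pair values (0 is an ordinary die value for B).
def D_count_two_pairs_score (dices : List Int) (notused : Int) : Prop :=
  2 ≤ dices.count 0 ∧ (∃ v ∈ dices, v < 0 ∧ 2 ≤ dices.count v) ∧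
    ¬(∃ v ∈ dices, 0 < v ∧ 2 ≤ dices.count v)
instance (dices : List Int) (notused : Int) : Decidable (D_count_two_pairs_score dices notused) := by
  unfold D_count_two_pairs_score; infer_instance

def Spec_count_two_pairs_score (dices : List Int) (notused : Int) (out : Int) : Prop :=
  ¬ D_count_two_pairs_score dices notused → out = count_two_pairs_score_alt dices notused
instance (dices : List Int) (notused : Int) (out : Int) : Decidable (Spec_count_two_pairs_score dices notused out) := by
  unfold Spec_count_two_pairs_score; infer_instance

def pvDiffWitness_count_two_pairs_score : List Int × Int := ([0, 0, -1, -1], 0)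
def pvDiffWitnessOut_count_two_pairs_score : Int × Int := (0, -2)

-- ===== CLAIM (what is proved, stated in full; the proofs are below) =====
def Claim_unchanged_count_two_pairs_score : Prop := ∀ (dices : List Int) (notused : Int), Dom_count_two_pairs_score dices notused → Spec_count_two_pairs_score dices notused (count_two_pairs_score dices notused)
def Claim_changed_count_two_pairs_score : Prop := Dom_count_two_pairs_score (pvDiffWitness_count_two_pairs_score.1) (pvDiffWitness_count_two_pairs_score.2) ∧ D_count_two_pairs_score (pvDiffWitness_count_two_pairs_score.1) (pvDiffWitness_count_two_pairs_score.2) ∧ count_two_pairs_score (pvDiffWitness_count_two_pairs_score.1) (pvDiffWitness_count_two_pairs_score.2) = pvDiffWitnessOut_count_two_pairs_score.1 ∧ count_two_pairs_score_alt (pvDiffWitness_count_two_pairs_score.1) (pvDiffWitness_count_two_pairs_score.2) = pvDiffWitnessOut_count_two_pairs_score.2 ∧ pvDiffWitnessOut_count_two_pairs_score.1 ≠ pvDiffWitnessOut_count_two_pairs_score.2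
def Claim_exact_count_two_pairs_score : Prop := ∀ (dices : List Int) (notused : Int), Dom_count_two_pairs_score dices notused → D_count_two_pairs_score dices notused → count_two_pairs_score dices notused ≠ count_two_pairs_score_alt dices notused

-- ===== LEMMAS AND PROOFS =====

-- A's loop on the remaining suffix, with the next element visible (no indices).
def loopSpec : List Int → Int → Int → Int
  | [], _, _ => 0
  | [_], _, _ => 0
  | d :: next :: t, temp, prev =>
    if d = prev then loopSpec (next :: t) temp prev
    else if d = next then
      (if temp ≠ 0 then temp + d * 2 else loopSpec (next :: t) (d * 2) d)
    else loopSpec (next :: t) temp d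

-- the distinct pair values A's loop detects, in order, starting from state `prev`
def pairsRec : List Int → Int → List Int
  | [], _ => []
  | d :: t, prev =>
    if d = prev then pairsRec t prev
    else if t.head? = some d then d :: pairsRec t d
    else pairsRec t d

-- result of A's loop in the temp = 0 state, given the detected pair values
def hZero : List Int → Int
  | [] => 0
  | p :: t => if p = 0 then hZero t else match t with
      | q :: _ => p * 2 + q * 2
      | [] => 0

-- result of A's loop given the state temp and the upcoming pair values
def gState (temp : Int) (ps : List Int) : Int :=
  if temp ≠ 0 then (match ps with | p :: _ => temp + p * 2 | [] => 0)
  else hZero ps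

def topTwo : List Int → Int
  | a :: b :: _ => (a + b) * 2
  | _ => 0

lemma go_eq_loopSpec (suf : List Int) : ∀ (pre : List Int) (temp prev : Int),
    count_two_pairs_score_go (pre ++ suf) (PySem.List.enumerate suf pre.length) temp prev
      = loopSpec suf temp prev := by
  induction suf with
  | nil =>
    intro pre temp prev
    simp only [PySem.List.enumerate_nil, count_two_pairs_score_go, loopSpec, List.append_nil]
  | cons d t ih =>
    intro pre temp prev
    rw [PySem.List.enumerate_cons]
    cases t with
    | nil =>
      simp only [count_two_pairs_score_go, loopSpec]
      rw [if_pos (show (pre.length : Int) > ((pre ++ [d]).length : Int) - 2 by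
        simp only [List.length_append, List.length_cons, List.length_nil]; push_cast; omega)]
    | cons next t' =>
      have hpre : ∀ temp' prev' : Int,
          count_two_pairs_score_go (pre ++ d :: next :: t')
            (PySem.List.enumerate (next :: t') ((pre.length : Int) + 1)) temp' prev'
            = loopSpec (next :: t') temp' prev' := by
        intro temp' prev'
        have h := ih (pre ++ [d]) temp' prev'
        simp only [List.append_assoc, List.singleton_append, List.length_append,
          List.length_cons, List.length_nil, Nat.cast_add, Nat.cast_one] at h
        exact h
      have hlen : ¬ ((pre.length : Int) > ((pre ++ d :: next :: t').length : Int) - 2) := by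
        simp only [List.length_append, List.length_cons]; push_cast; omega
      have hget : PySem.List.pyGet? (pre ++ d :: next :: t') ((pre.length : Int) + 1) = some next := by
        have h1 : ((pre.length : Int) + 1) = ((pre.length + 1 : Nat) : Int) := by push_cast; ring
        rw [h1, PySem.List.pyGet?_natCast]
        rw [List.getElem?_append_right (by omega)]
        simp
      simp only [count_two_pairs_score_go, loopSpec]
      rw [if_neg hlen]
      by_cases h1 : d = prev
      · rw [if_pos h1, if_pos h1, hpre]
      · rw [if_neg h1, if_neg h1, hget]
        by_cases h2 : d = next
        · rw [if_pos (show some next = some d by rw [h2]), if_pos h2]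
          by_cases h3 : temp ≠ 0
          · rw [if_pos h3, if_pos h3]
          · rw [if_neg h3, if_neg h3, hpre]
        · rw [if_neg (show ¬ some next = some d by simpa using fun h => h2 h.symm),
            if_neg h2, hpre]

lemma gState_nil (temp : Int) : gState temp [] = 0 := by
  simp only [gState, hZero]
  split <;> rfl

lemma loopSpec_eq_gState (s : List Int) : ∀ temp prev : Int,
    loopSpec s temp prev = gState temp (pairsRec s prev) := by
  induction s with
  | nil => intro temp prev; rw [pairsRec, gState_nil]; rfl
  | cons d t ih =>
    intro temp prev
    cases t with
    | nil =>
      have hp : pairsRec [d] prev = [] := by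
        rw [pairsRec]
        by_cases h : d = prev
        · rw [if_pos h, pairsRec]
        · rw [if_neg h, if_neg (by simp), pairsRec]
      rw [hp, gState_nil]
      rfl
    | cons next t' =>
      rw [loopSpec, pairsRec]
      by_cases h1 : d = prev
      · rw [if_pos h1, if_pos h1]; exact ih temp prev
      · rw [if_neg h1, if_neg h1]
        by_cases h2 : d = next
        · rw [if_pos h2, if_pos (show (next :: t').head? = some d by simp [h2.symm])]
          by_cases h3 : temp ≠ 0
          · rw [if_pos h3]
            simp only [gState, if_pos h3]
          · rw [if_neg h3, ih (d * 2) d]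
            have h3' : temp = 0 := not_not.mp h3
            subst h3'
            generalize pairsRec (next :: t') d = ps
            by_cases hd : d = 0
            · subst hd
              simp only [gState, hZero]
              norm_num
            · have hd2 : d * 2 ≠ 0 := by omega
              simp only [gState, hZero, if_pos hd2, if_neg hd]
              norm_num
        · rw [if_neg (show ¬ (next :: t').head? = some d by
              simpa using fun h => h2 h.symm), if_neg h2]
          exact ih temp d

lemma count_cons_int (d v : Int) (t : List Int) :
    (d :: t).count v = t.count v + if v = d then 1 else 0 := by
  simp only [List.count_cons, beq_iff_eq]
  congr 1
  by_cases h : v = d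
  · simp [h]
  · rw [if_neg h, if_neg (fun hh => h hh.symm)]

-- the characterisation of pairsRec for a descending list, from a dominating prev
lemma pairsRec_char (s : List Int) : ∀ prev : Int,
    s.Pairwise (fun a b => b ≤ a) → (∀ x ∈ s, x ≤ prev) →
    (pairsRec s prev).Pairwise (fun a b => b < a) ∧
      (∀ v : Int, v ∈ pairsRec s prev ↔ 2 ≤ s.count v ∧ v ≠ prev) := by
  induction s with
  | nil => intro prev _ _; rw [pairsRec]; simp
  | cons d t ih =>
    intro prev hs hp
    have hst : t.Pairwise (fun a b => b ≤ a) := hs.tail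
    have hdt : ∀ x ∈ t, x ≤ d := fun x hx => (List.pairwise_cons.mp hs).1 x hx
    have hdp : d ≤ prev := hp d (by simp)
    rw [pairsRec]
    by_cases h1 : d = prev
    · rw [if_pos h1]
      subst h1
      obtain ⟨hpw, hmem⟩ := ih d hst hdt
      refine ⟨hpw, fun v => ?_⟩
      rw [hmem v, count_cons_int]
      constructor
      · rintro ⟨hc, hv⟩
        refine ⟨?_, hv⟩
        have : ¬ (v = d) := hv
        rw [if_neg this]
        omega
      · rintro ⟨hc, hv⟩
        have : ¬ (v = d) := hv
        rw [if_neg this] at hc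
        rw [add_zero] at hc
        exact ⟨hc, hv⟩
    · have hdlt : d < prev := lt_of_le_of_ne hdp h1
      rw [if_neg h1]
      cases t with
      | nil =>
        rw [if_neg (show ¬ ([] : List Int).head? = some d by simp), pairsRec]
        refine ⟨List.Pairwise.nil, fun v => ?_⟩
        simp only [List.not_mem_nil, false_iff]
        rintro ⟨hc, -⟩
        rw [count_cons_int, List.count_nil] at hc
        split at hc <;> omega
      | cons next t' =>
        have hnd : next ≤ d := hdt next (by simp)
        obtain ⟨hpw, hmem⟩ := ih d hst hdt
        have hmem_le : ∀ v : Int, 2 ≤ (next :: t').count v → v ≤ d := by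
          intro v hc
          exact hdt v (List.count_pos_iff.mp (by omega))
        by_cases h2 : next = d
        · rw [if_pos (show (next :: t').head? = some d by simp [h2])]
          constructor
          · rw [List.pairwise_cons]
            refine ⟨fun v hv => ?_, hpw⟩
            obtain ⟨hc, hvd⟩ := (hmem v).mp hv
            exact lt_of_le_of_ne (hmem_le v hc) hvd
          · intro v
            simp only [List.mem_cons, hmem v]
            constructor
            · rintro (rfl | ⟨hc, hvd⟩)
              · have hd1 : 1 ≤ (next :: t').count v := by
                  rw [h2]
                  have : (v : Int) ∈ v :: t' := by simp
                  exact List.count_pos_iff.mpr this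
                refine ⟨?_, h1⟩
                rw [count_cons_int, if_pos rfl]
                omega
              · have hvle : v ≤ d := hmem_le v hc
                refine ⟨?_, by omega⟩
                rw [count_cons_int, if_neg hvd]
                omega
            · rintro ⟨hc, hv⟩
              by_cases hvd : v = d
              · exact Or.inl hvd
              · right
                rw [count_cons_int, if_neg hvd, add_zero] at hc
                exact ⟨hc, hvd⟩
        · have hnd' : next < d := lt_of_le_of_ne hnd h2
          have hdnot : (next :: t').count d = 0 := by
            rw [List.count_eq_zero]
            intro hmemd
            rcases List.mem_cons.mp hmemd with h | h
            · omega
            · have := (List.pairwise_cons.mp hst).1 d h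
              omega
          rw [if_neg (show ¬ (next :: t').head? = some d by
            simp only [List.head?_cons, Option.some.injEq]; exact h2)]
          refine ⟨hpw, fun v => ?_⟩
          rw [hmem v]
          constructor
          · rintro ⟨hc, hvd⟩
            have hvle : v ≤ d := hmem_le v hc
            refine ⟨?_, by omega⟩
            rw [count_cons_int, if_neg hvd]
            omega
          · rintro ⟨hc, hv⟩
            by_cases hvd : v = d
            · subst hvd
              rw [count_cons_int, if_pos rfl] at hc
              omega
            · rw [count_cons_int, if_neg hvd, add_zero] at hc
              exact ⟨hc, hvd⟩

-- two strictly descending lists with the same members are equal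
lemma eq_of_pairwise_gt_of_mem_iff : ∀ (l₁ l₂ : List Int),
    l₁.Pairwise (fun a b => b < a) → l₂.Pairwise (fun a b => b < a) →
    (∀ v, v ∈ l₁ ↔ v ∈ l₂) → l₁ = l₂ := by
  intro l₁
  induction l₁ with
  | nil =>
    intro l₂ _ _ hm
    cases l₂ with
    | nil => rfl
    | cons b t => exact absurd ((hm b).mpr (by simp)) (by simp)
  | cons a t₁ ih =>
    intro l₂ h₁ h₂ hm
    cases l₂ with
    | nil => exact absurd ((hm a).mp (by simp)) (by simp)
    | cons b t₂ =>
      have hab : a = b := by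
        have ha : a ∈ b :: t₂ := (hm a).mp (by simp)
        have hb : b ∈ a :: t₁ := (hm b).mpr (by simp)
        rcases List.mem_cons.mp ha with h | h
        · exact h
        · have hba : a < b := (List.pairwise_cons.mp h₂).1 a h
          rcases List.mem_cons.mp hb with h' | h'
          · omega
          · have : b < a := (List.pairwise_cons.mp h₁).1 b h'
            omega
      subst hab
      congr 1
      apply ih t₂ h₁.tail h₂.tail
      intro v
      constructor
      · intro hv
        have hva : v < a := (List.pairwise_cons.mp h₁).1 v hv
        have := (hm v).mp (List.mem_cons_of_mem a hv)
        rcases List.mem_cons.mp this with h | h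
        · omega
        · exact h
      · intro hv
        have hva : v < a := (List.pairwise_cons.mp h₂).1 v hv
        have := (hm v).mpr (List.mem_cons_of_mem a hv)
        rcases List.mem_cons.mp this with h | h
        · omega
        · exact h

-- B's pair_values list: strictly descending, members = values occurring at least twice in s
def blOf (s : List Int) : List Int :=
  PySem.List.sorted (((PySem.Dict.counter s).items.filter (fun kv => 2 ≤ kv.2)).map Prod.fst)
    (fun x => x) true

lemma alt_eq_topTwo (dices : List Int) (notused : Int) :
    count_two_pairs_score_alt dices notused
      = topTwo (blOf (PySem.List.sorted dices (fun x => x) true)) := by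
  unfold count_two_pairs_score_alt blOf topTwo
  simp only [PySem.Dict.foldl_insert_getD_add_one_eq_counter]

lemma a_eq_hZero (dices : List Int) (notused : Int) :
    count_two_pairs_score dices notused
      = hZero (pairsRec (PySem.List.sorted dices (fun x => x) true) 0) := by
  unfold count_two_pairs_score
  have h := go_eq_loopSpec (PySem.List.sorted dices (fun x => x) true) [] 0 0
  simp only [List.nil_append, List.length_nil, Nat.cast_zero] at h
  rw [h, loopSpec_eq_gState]
  simp [gState]

lemma blOf_char (s : List Int) :
    (blOf s).Pairwise (fun a b => b < a) ∧
      (∀ v : Int, v ∈ blOf s ↔ 2 ≤ s.count v) := by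
  have hitems : ((PySem.Dict.counter s).items.filter (fun kv => 2 ≤ kv.2)).map Prod.fst
      = (PySem.Set.ofList s).filter (fun k => decide (2 ≤ ((s.count k : Int)))) := by
    rw [PySem.Dict.items_counter, List.filter_map, List.map_map]
    have h1 : (Prod.fst ∘ fun k : Int => (k, ((s.count k : Int)))) = id := rfl
    rw [h1, List.map_id]
    rfl
  have hmemC : ∀ v : Int, v ∈ (PySem.Set.ofList s).filter
      (fun k => decide (2 ≤ ((s.count k : Int)))) ↔ 2 ≤ s.count v := by
    intro v
    rw [List.mem_filter, PySem.Set.mem_ofList]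
    constructor
    · rintro ⟨-, h⟩; exact_mod_cast of_decide_eq_true h
    · intro h
      exact ⟨List.count_pos_iff.mp (by omega), decide_eq_true (by exact_mod_cast h)⟩
  have hnodupC : ((PySem.Set.ofList s).filter
      (fun k => decide (2 ≤ ((s.count k : Int))))).Nodup :=
    (PySem.Set.nodup_ofList s).filter _
  constructor
  · have hle : (blOf s).Pairwise (fun a b => b ≤ a) := by
      have := PySem.List.sorted_pairwise_rev
        (((PySem.Dict.counter s).items.filter (fun kv => 2 ≤ kv.2)).map Prod.fst) (fun x => x)
      exact this
    have hnd : (blOf s).Nodup := by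
      unfold blOf
      rw [hitems]
      rw [List.Perm.nodup_iff (PySem.List.sorted_perm _ _ _)]
      exact hnodupC
    exact (hle.and hnd).imp (fun h => lt_of_le_of_ne h.1 (fun he => h.2 he.symm))
  · intro v
    unfold blOf
    rw [PySem.List.mem_sorted, hitems]
    exact hmemC v

-- A result = B result for a strictly descending pair-value list, outside D_
lemma hZero_eq_topTwo (dices bl : List Int)
    (hpw : bl.Pairwise (fun a b => b < a))
    (hmem : ∀ v : Int, v ∈ bl ↔ 2 ≤ dices.count v)
    (hnD : ¬ (2 ≤ dices.count 0 ∧ (∃ v ∈ dices, v < 0 ∧ 2 ≤ dices.count v) ∧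
      ¬(∃ v ∈ dices, 0 < v ∧ 2 ≤ dices.count v))) :
    hZero bl = topTwo bl := by
  cases bl with
  | nil => rfl
  | cons a t =>
    cases t with
    | nil =>
      simp only [hZero, topTwo]
      split <;> rfl
    | cons b r =>
      by_cases ha : a = 0
      · exfalso
        subst ha
        apply hnD
        have h0 : 2 ≤ dices.count 0 := (hmem 0).mp (by simp)
        have hb : 2 ≤ dices.count b := (hmem b).mp (by simp)
        have hba : b < 0 := (List.pairwise_cons.mp hpw).1 b (by simp)
        refine ⟨h0, ⟨b, List.count_pos_iff.mp (by omega), hba, hb⟩, ?_⟩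
        rintro ⟨v, -, hvpos, hvc⟩
        have hvbl : v ∈ 0 :: b :: r := (hmem v).mpr hvc
        rcases List.mem_cons.mp hvbl with h | h
        · omega
        · have := (List.pairwise_cons.mp hpw).1 v h
          omega
      · simp only [hZero, topTwo, if_neg ha]
        ring

-- for a descending list with non-zero head, A's detected pair values are exactly B's list
lemma pairsRec_eq_blOf (d : Int) (t : List Int)
    (hs : (d :: t).Pairwise (fun a b => b ≤ a)) (hd : d ≠ 0) :
    pairsRec (d :: t) 0 = blOf (d :: t) := by
  have hst : t.Pairwise (fun a b => b ≤ a) := hs.tail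
  have hdt : ∀ x ∈ t, x ≤ d := fun x hx => (List.pairwise_cons.mp hs).1 x hx
  obtain ⟨blpw, blmem⟩ := blOf_char (d :: t)
  obtain ⟨ppw, pmem⟩ := pairsRec_char t d hst hdt
  apply eq_of_pairwise_gt_of_mem_iff _ _ ?_ blpw ?_
  · rw [pairsRec, if_neg hd]
    split
    · rename_i hhead
      rw [List.pairwise_cons]
      refine ⟨fun v hv => ?_, ppw⟩
      obtain ⟨hc, hvd⟩ := (pmem v).mp hv
      have hvt : v ∈ t := List.count_pos_iff.mp (by omega)
      exact lt_of_le_of_ne (hdt v hvt) hvd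
    · exact ppw
  · intro v
    rw [blmem v, pairsRec, if_neg hd]
    rw [count_cons_int]
    split
    · rename_i hhead
      have hdint : (1 : Nat) ≤ t.count d := by
        cases t with
        | nil => simp at hhead
        | cons x u =>
          simp only [List.head?_cons, Option.some.injEq] at hhead
          rw [hhead, count_cons_int, if_pos rfl]
          omega
      simp only [List.mem_cons, pmem v]
      constructor
      · rintro (rfl | ⟨hc, hvd⟩)
        · rw [if_pos rfl]; omega
        · rw [if_neg hvd]; omega
      · intro hc
        by_cases hvd : v = d
        · exact Or.inl hvd
        · rw [if_neg hvd, add_zero] at hc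
          exact Or.inr ⟨hc, hvd⟩
    · rename_i hhead
      have hdnot : t.count d = 0 := by
        rw [List.count_eq_zero]
        intro hmemd
        cases t with
        | nil => simp at hmemd
        | cons x u =>
          rcases List.mem_cons.mp hmemd with h | h
          · exact hhead (by simp [h])
          · have hxd : x ≤ d := hdt x (by simp)
            have hdx : d ≤ x := (List.pairwise_cons.mp hst).1 d h
            exact hhead (by simp [le_antisymm hxd hdx])
      rw [pmem v]
      constructor
      · rintro ⟨hc, hvd⟩
        rw [if_neg hvd]
        omega
      · intro hc
        by_cases hvd : v = d
        · subst hvd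
          rw [if_pos rfl] at hc
          omega
        · rw [if_neg hvd, add_zero] at hc
          exact ⟨hc, hvd⟩

theorem count_two_pairs_score_spec : Claim_unchanged_count_two_pairs_score := by
  unfold Claim_unchanged_count_two_pairs_score
  intro dices notused _
  unfold Spec_count_two_pairs_score
  intro hnD
  unfold D_count_two_pairs_score at hnD
  rw [a_eq_hZero, alt_eq_topTwo]
  set s := PySem.List.sorted dices (fun x => x) true with hsdef
  have hperm : s.Perm dices := PySem.List.sorted_perm dices (fun x => x) true
  have hcount : ∀ v : Int, s.count v = dices.count v := fun v => hperm.count_eq v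
  have hs : s.Pairwise (fun a b => b ≤ a) := PySem.List.sorted_pairwise_rev dices (fun x => x)
  obtain ⟨blpw, blmem⟩ := blOf_char s
  have blmem' : ∀ v : Int, v ∈ blOf s ↔ 2 ≤ dices.count v := by
    intro v; rw [blmem v, hcount v]
  suffices h : pairsRec s 0 = blOf s ∨ (pairsRec s 0 = [] ∧ blOf s = [(0 : Int)]) by
    rcases h with h | ⟨h1, h2⟩
    · rw [h]; exact hZero_eq_topTwo dices (blOf s) blpw blmem' hnD
    · rw [h1, h2]; rfl
  -- characterise pairsRec s 0 by cases on the head of s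
  clear hsdef
  clear_value s
  cases s with
  | nil =>
    left
    rw [pairsRec]
    symm
    rw [List.eq_nil_iff_forall_not_mem]
    intro v hv
    have := (blmem v).mp hv
    simp at this
  | cons d t =>
    have hst : t.Pairwise (fun a b => b ≤ a) := hs.tail
    have hdt : ∀ x ∈ t, x ≤ d := fun x hx => (List.pairwise_cons.mp hs).1 x hx
    by_cases hd : d = 0
    · -- head is 0: every element of s is ≤ 0
      subst hd
      have hp : ∀ x ∈ (0 : Int) :: t, x ≤ 0 := by
        intro x hx
        rcases List.mem_cons.mp hx with h | h
        · omega
        · exact hdt x h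
      obtain ⟨ppw, pmem⟩ := pairsRec_char ((0 : Int) :: t) 0 hs hp
      by_cases h02 : 2 ≤ dices.count 0
      · -- pair of zeros present; ¬D_ forces no other pair at all
        right
        have hnoneg : ¬ (∃ v ∈ dices, v < 0 ∧ 2 ≤ dices.count v) := by
          intro hneg
          apply hnD
          refine ⟨h02, hneg, ?_⟩
          rintro ⟨v, -, hvpos, hvc⟩
          have hvs : v ∈ (0 : Int) :: t :=
            hperm.mem_iff.mpr (List.count_pos_iff.mp (by omega))
          have := hp v hvs
          omega
        constructor
        · rw [List.eq_nil_iff_forall_not_mem]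
          intro v hv
          obtain ⟨hc, hv0⟩ := (pmem v).mp hv
          have hvs : v ∈ (0 : Int) :: t := List.count_pos_iff.mp (by omega)
          have hvle := hp v hvs
          apply hnoneg
          refine ⟨v, ?_, by omega, by rw [← hcount v]; exact hc⟩
          rw [← hperm.mem_iff]
          exact hvs
        · -- blOf s contains exactly the value 0
          have h0bl : (0 : Int) ∈ blOf ((0 : Int) :: t) := (blmem' 0).mpr h02
          have hall : ∀ v ∈ blOf ((0 : Int) :: t), v = (0 : Int) := by
            intro v hv
            have hc := (blmem' v).mp hv
            have hvs : v ∈ (0 : Int) :: t :=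
              hperm.mem_iff.mpr (List.count_pos_iff.mp (by omega))
            have hvle := hp v hvs
            by_contra hne
            exact hnoneg ⟨v, by rw [← hperm.mem_iff]; exact hvs,
              lt_of_le_of_ne hvle hne, hc⟩
          cases hbl : blOf ((0 : Int) :: t) with
          | nil => rw [hbl] at h0bl; simp at h0bl
          | cons a u =>
            have ha : a = 0 := hall a (by rw [hbl]; simp)
            have hu : u = [] := by
              rw [List.eq_nil_iff_forall_not_mem]
              intro v hv
              have hv0 : v = 0 := hall v (by rw [hbl]; exact List.mem_cons_of_mem a hv)
              have := (List.pairwise_cons.mp (hbl ▸ blpw)).1 v hv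
              omega
            rw [ha, hu]
      · -- no pair of zeros: the v ≠ 0 side condition is vacuous
        left
        apply eq_of_pairwise_gt_of_mem_iff _ _ ppw blpw
        intro v
        rw [pmem v, blmem' v, ← hcount v]
        constructor
        · rintro ⟨hc, -⟩; exact hc
        · intro hc
          refine ⟨hc, ?_⟩
          intro hv0
          subst hv0
          rw [← hcount 0] at h02
          exact h02 hc
    · -- head d ≠ 0 : the pair values A scans are exactly B's pair_values list
      left
      exact pairsRec_eq_blOf d t hs hd

theorem count_two_pairs_score_changed : Claim_changed_count_two_pairs_score := by
  unfold Claim_changed_count_two_pairs_score; decide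

theorem count_two_pairs_score_tight : Claim_exact_count_two_pairs_score := by
  unfold Claim_exact_count_two_pairs_score
  intro dices notused _ hD
  unfold D_count_two_pairs_score at hD
  obtain ⟨h02, ⟨q, hqmem, hqneg, hqc⟩, hnopos⟩ := hD
  rw [a_eq_hZero, alt_eq_topTwo]
  set s := PySem.List.sorted dices (fun x => x) true with hsdef
  have hperm : s.Perm dices := PySem.List.sorted_perm dices (fun x => x) true
  have hcount : ∀ v : Int, s.count v = dices.count v := fun v => hperm.count_eq v
  have hs : s.Pairwise (fun a b => b ≤ a) := PySem.List.sorted_pairwise_rev dices (fun x => x)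
  obtain ⟨blpw, blmem⟩ := blOf_char s
  have blmem' : ∀ v : Int, v ∈ blOf s ↔ 2 ≤ dices.count v := by
    intro v; rw [blmem v, hcount v]
  clear hsdef
  clear_value s
  -- B's list is 0 :: b :: r with b < 0
  have h0 : (0 : Int) ∈ blOf s := (blmem' 0).mpr h02
  have hqbl : q ∈ blOf s := (blmem' q).mpr hqc
  have hnoposbl : ∀ v ∈ blOf s, v ≤ 0 := by
    intro v hv
    by_contra hgt
    exact hnopos ⟨v, List.count_pos_iff.mp (by have := (blmem' v).mp hv; omega),
      by omega, (blmem' v).mp hv⟩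
  cases hbl : blOf s with
  | nil => rw [hbl] at h0; simp at h0
  | cons a u =>
    have ha : a = 0 := by
      have hle : a ≤ 0 := hnoposbl a (by rw [hbl]; simp)
      rcases List.mem_cons.mp (hbl ▸ h0) with h | h
      · omega
      · have := (List.pairwise_cons.mp (hbl ▸ blpw)).1 0 h
        omega
    subst ha
    have hqu : q ∈ u := by
      rcases List.mem_cons.mp (hbl ▸ hqbl) with h | h
      · omega
      · exact h
    cases u with
    | nil => simp at hqu
    | cons b r =>
      have hb : b < 0 := (List.pairwise_cons.mp (hbl ▸ blpw)).1 b (by simp)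
      -- A's loop result is hZero (b :: r): the leading pair of zeros is skipped
      have hA : hZero (pairsRec s 0) = hZero (b :: r) := by
        cases s with
        | nil =>
          exfalso
          have : (0 : Int) ∈ ([] : List Int) := hperm.mem_iff.mpr
            (List.count_pos_iff.mp (by omega))
          simp at this
        | cons d t =>
          by_cases hd : d = 0
          · subst hd
            have hp : ∀ x ∈ (0 : Int) :: t, x ≤ 0 := by
              intro x hx
              rcases List.mem_cons.mp hx with h | h
              · omega
              · exact (List.pairwise_cons.mp hs).1 x h
            obtain ⟨ppw, pmem⟩ := pairsRec_char ((0 : Int) :: t) 0 hs hp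
            congr 1
            apply eq_of_pairwise_gt_of_mem_iff _ _ ppw ?_ ?_
            · exact (List.pairwise_cons.mp (hbl ▸ blpw)).2
            · intro v
              rw [pmem v]
              constructor
              · rintro ⟨hc, hv0⟩
                have hvbl : v ∈ blOf ((0 : Int) :: t) := (blmem v).mpr hc
                rcases List.mem_cons.mp (hbl ▸ hvbl) with h | h
                · omega
                · exact h
              · intro hv
                have hvbl : v ∈ blOf ((0 : Int) :: t) := by
                  rw [hbl]
                  exact List.mem_cons_of_mem _ hv
                refine ⟨(blmem v).mp hvbl, ?_⟩
                have := (List.pairwise_cons.mp (hbl ▸ blpw)).1 v hv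
                omega
          · rw [pairsRec_eq_blOf d t hs hd, hbl, hZero, if_pos rfl]
      rw [hA]
      have hbne : ¬ (b = 0) := by omega
      cases r with
      | nil =>
        simp only [hZero, topTwo, if_neg hbne]
        omega
      | cons c r' =>
        have hcb : c < b :=
          (List.pairwise_cons.mp ((List.pairwise_cons.mp (hbl ▸ blpw)).2)).1 c (by simp)
        simp only [hZero, topTwo, if_neg hbne]
        omega
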